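-- pv_equiv track=rewrite | github.com/yogishyb/mx-error-guide | scraper/scrape_iso20022.py | get_xpaths
-- ===== SOURCE A (Python) =====
-- def get_xpaths(code: str) -> list:
--     mapping = {
--         "AC": ["/Document/FIToFICstmrCdtTrf/CdtTrfTxInf/CdtrAcct/Id/IBAN",
--                "/Document/FIToFICstmrCdtTrf/CdtTrfTxInf/CdtrAcct/Id/Othr/Id"],
--         "RC": ["/Document/FIToFICstmrCdtTrf/CdtTrfTxInf/CdtrAgt/FinInstnId/BICFI",
--                "/Document/FIToFICstmrCdtTrf/CdtTrfTxInf/CdtrAgt/FinInstnId/ClrSysMmbId"],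
--         "AM": ["/Document/FIToFICstmrCdtTrf/CdtTrfTxInf/IntrBkSttlmAmt",
--                "/Document/FIToFICstmrCdtTrf/CdtTrfTxInf/InstdAmt"],
--         "BE": ["/Document/FIToFICstmrCdtTrf/CdtTrfTxInf/Cdtr/Nm",
--                "/Document/FIToFICstmrCdtTrf/CdtTrfTxInf/Cdtr/PstlAdr"],
--         "RR": ["/Document/FIToFICstmrCdtTrf/CdtTrfTxInf/RgltryRptg"],
--         "MM": ["/Document/FIToFICstmrCdtTrf/CdtTrfTxInf/Cdtr/Nm"],
--         "NARR": ["/Document/FIToFICstmrCdtTrf/CdtTrfTxInf/RmtInf/Ustrd"],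
--         "AGNT": ["/Document/FIToFICstmrCdtTrf/GrpHdr/InstgAgt",
--                  "/Document/FIToFICstmrCdtTrf/GrpHdr/InstdAgt"],
--         "CURR": ["/Document/FIToFICstmrCdtTrf/CdtTrfTxInf/IntrBkSttlmAmt/@Ccy"],
--     }
--     for prefix, paths in mapping.items():
--         if code.startswith(prefix):
--             return paths
--     return []
-- ===== SOURCE B (Python) =====
-- _PATHS_4 = {
--     "NARR": ["/Document/FIToFICstmrCdtTrf/CdtTrfTxInf/RmtInf/Ustrd"],
--     "AGNT": ["/Document/FIToFICstmrCdtTrf/GrpHdr/InstgAgt",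
--              "/Document/FIToFICstmrCdtTrf/GrpHdr/InstdAgt"],
--     "CURR": ["/Document/FIToFICstmrCdtTrf/CdtTrfTxInf/IntrBkSttlmAmt/@Ccy"],
-- }
--
-- _PATHS_2 = {
--     "AC": ["/Document/FIToFICstmrCdtTrf/CdtTrfTxInf/CdtrAcct/Id/IBAN",
--            "/Document/FIToFICstmrCdtTrf/CdtTrfTxInf/CdtrAcct/Id/Othr/Id"],
--     "RC": ["/Document/FIToFICstmrCdtTrf/CdtTrfTxInf/CdtrAgt/FinInstnId/BICFI",
--            "/Document/FIToFICstmrCdtTrf/CdtTrfTxInf/CdtrAgt/FinInstnId/ClrSysMmbId"],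
--     "AM": ["/Document/FIToFICstmrCdtTrf/CdtTrfTxInf/IntrBkSttlmAmt",
--            "/Document/FIToFICstmrCdtTrf/CdtTrfTxInf/InstdAmt"],
--     "BE": ["/Document/FIToFICstmrCdtTrf/CdtTrfTxInf/Cdtr/Nm",
--            "/Document/FIToFICstmrCdtTrf/CdtTrfTxInf/Cdtr/PstlAdr"],
--     "RR": ["/Document/FIToFICstmrCdtTrf/CdtTrfTxInf/RgltryRptg"],
--     "MM": ["/Document/FIToFICstmrCdtTrf/CdtTrfTxInf/Cdtr/Nm"],
-- }
--
--
-- def get_xpaths(code: str) -> list: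
--     hit = _PATHS_4.get(code[:4])
--     if hit is None:
--         hit = _PATHS_2.get(code[:2])
--     return hit if hit is not None else []
-- ===== Notes on version B (the rewrite author's own statement) =====
-- stated objective: idiomatic
-- what changed: Replaces the sequential startswith scan over a 9-entry dict by two module-level lookup tables keyed by prefix length, queried with code[:4] then code[:2] as direct dict lookups.
import Mathlib
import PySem

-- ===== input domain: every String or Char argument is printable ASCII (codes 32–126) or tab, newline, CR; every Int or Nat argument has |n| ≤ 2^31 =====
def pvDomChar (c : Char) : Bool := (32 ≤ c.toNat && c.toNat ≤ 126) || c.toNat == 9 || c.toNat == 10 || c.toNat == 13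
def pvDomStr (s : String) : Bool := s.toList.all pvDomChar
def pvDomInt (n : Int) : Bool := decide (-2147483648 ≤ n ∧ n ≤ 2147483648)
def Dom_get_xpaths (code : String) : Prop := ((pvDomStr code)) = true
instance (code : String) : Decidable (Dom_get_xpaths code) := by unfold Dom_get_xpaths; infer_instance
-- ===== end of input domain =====

-- B replaces A's sequential startswith scan by two tables keyed by prefix length,
-- queried with code[:4] then code[:2] as direct dict lookups (objective: idiomatic).

-- the nine path lists (shared literals of both sources)
def pvAC : List String := ["/Document/FIToFICstmrCdtTrf/CdtTrfTxInf/CdtrAcct/Id/IBAN",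
                           "/Document/FIToFICstmrCdtTrf/CdtTrfTxInf/CdtrAcct/Id/Othr/Id"]
def pvRC : List String := ["/Document/FIToFICstmrCdtTrf/CdtTrfTxInf/CdtrAgt/FinInstnId/BICFI",
                           "/Document/FIToFICstmrCdtTrf/CdtTrfTxInf/CdtrAgt/FinInstnId/ClrSysMmbId"]
def pvAM : List String := ["/Document/FIToFICstmrCdtTrf/CdtTrfTxInf/IntrBkSttlmAmt",
                           "/Document/FIToFICstmrCdtTrf/CdtTrfTxInf/InstdAmt"]
def pvBE : List String := ["/Document/FIToFICstmrCdtTrf/CdtTrfTxInf/Cdtr/Nm",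
                           "/Document/FIToFICstmrCdtTrf/CdtTrfTxInf/Cdtr/PstlAdr"]
def pvRR : List String := ["/Document/FIToFICstmrCdtTrf/CdtTrfTxInf/RgltryRptg"]
def pvMM : List String := ["/Document/FIToFICstmrCdtTrf/CdtTrfTxInf/Cdtr/Nm"]
def pvNARR : List String := ["/Document/FIToFICstmrCdtTrf/CdtTrfTxInf/RmtInf/Ustrd"]
def pvAGNT : List String := ["/Document/FIToFICstmrCdtTrf/GrpHdr/InstgAgt",
                             "/Document/FIToFICstmrCdtTrf/GrpHdr/InstdAgt"]
def pvCURR : List String := ["/Document/FIToFICstmrCdtTrf/CdtTrfTxInf/IntrBkSttlmAmt/@Ccy"]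

-- ===== PORT A =====
-- the dict literal `mapping`
def pvMapping : PySem.Dict String (List String) :=
  PySem.Dict.ofList [("AC", pvAC), ("RC", pvRC), ("AM", pvAM), ("BE", pvBE),
                     ("RR", pvRR), ("MM", pvMM), ("NARR", pvNARR), ("AGNT", pvAGNT), ("CURR", pvCURR)]

-- `for prefix, paths in mapping.items(): if code.startswith(prefix): return paths`
def pvScanA : List (String × List String) → String → List String
  | [], _ => []
  | (pfx, paths) :: rest, code =>
      if PySem.Str.startswith code pfx then paths else pvScanA rest code

def get_xpaths (code : String) : List String := pvScanA pvMapping.items code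

-- ===== PORT B =====
def pvT4 : PySem.Dict String (List String) :=
  PySem.Dict.ofList [("NARR", pvNARR), ("AGNT", pvAGNT), ("CURR", pvCURR)]
def pvT2 : PySem.Dict String (List String) :=
  PySem.Dict.ofList [("AC", pvAC), ("RC", pvRC), ("AM", pvAM), ("BE", pvBE), ("RR", pvRR), ("MM", pvMM)]

def get_xpaths_alt (code : String) : List String :=
  match PySem.Dict.get? pvT4 (PySem.Str.slice code none (some 4)) with
  | some paths => paths
  | none => (PySem.Dict.get? pvT2 (PySem.Str.slice code none (some 2))).getD []

-- ===== PRECONDITION & SPEC =====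
def Spec_get_xpaths (code : String) (out : List String) : Prop := out = get_xpaths_alt code
instance (code : String) (out : List String) : Decidable (Spec_get_xpaths code out) := by unfold Spec_get_xpaths; infer_instance

-- ===== CLAIM (what is proved, stated in full; the proofs are below) =====
def Claim_equal_get_xpaths : Prop := ∀ (code : String), Dom_get_xpaths code → Spec_get_xpaths code (get_xpaths code)

-- ===== LEMMAS AND PROOFS =====

-- `k == code[:n]` (n = length of the literal key) is exactly `code.startswith(k)`
theorem pvKeyIff (code k : String) {n : Nat} (hn : k.toList.length = n) :
    ((k == PySem.Str.slice code none (some (n : Int))) = true) ↔ k.toList <+: code.toList := by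
  rw [beq_iff_eq, ← String.toList_inj]
  have hs : (PySem.Str.slice code none (some (n : Int))).toList = code.toList.take n := by
    simp [PySem.Str.toList_slice, PySem.List.slice_to_natCast]
  rw [hs, List.prefix_iff_eq_take, hn]

-- two prefixes of the same string are comparable; distinct incomparable keys exclude each other
theorem pvExcl {cs p q : List Char} (hpq : ¬ p <+: q) (hqp : ¬ q <+: p)
    (hp : p <+: cs) (hq : q <+: cs) : False := by
  rcases List.prefix_or_prefix_of_prefix hp hq with h | h
  · exact hpq h
  · exact hqp h

-- A as a chain of prefix tests in the dict's insertion order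
theorem pvA_eq (code : String) : get_xpaths code =
    if "AC".toList <+: code.toList then pvAC
    else if "RC".toList <+: code.toList then pvRC
    else if "AM".toList <+: code.toList then pvAM
    else if "BE".toList <+: code.toList then pvBE
    else if "RR".toList <+: code.toList then pvRR
    else if "MM".toList <+: code.toList then pvMM
    else if "NARR".toList <+: code.toList then pvNARR
    else if "AGNT".toList <+: code.toList then pvAGNT
    else if "CURR".toList <+: code.toList then pvCURR
    else [] := by
  have hitems : pvMapping.items =
      [("AC", pvAC), ("RC", pvRC), ("AM", pvAM), ("BE", pvBE),
       ("RR", pvRR), ("MM", pvMM), ("NARR", pvNARR), ("AGNT", pvAGNT), ("CURR", pvCURR)] := rfl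
  rw [get_xpaths, hitems]
  simp only [pvScanA, PySem.Chars.startswith_iff, PySem.Str.startswith_eq]

-- ===== VERDICT (by name: the statement is the Claim_ definition above) =====
theorem get_xpaths_spec : Claim_equal_get_xpaths := by
  intro code _
  unfold Spec_get_xpaths
  rw [pvA_eq]
  have e4 : pvT4 = PySem.Dict.mk [("NARR", pvNARR), ("AGNT", pvAGNT), ("CURR", pvCURR)] := rfl
  have e2 : pvT2 = PySem.Dict.mk [("AC", pvAC), ("RC", pvRC), ("AM", pvAM), ("BE", pvBE), ("RR", pvRR), ("MM", pvMM)] := rfl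
  have enil : ∀ s : String, (PySem.Dict.mk ([] : List (String × List String))).get? s = none := fun _ => rfl
  have h4 : ∀ k : String, k.toList.length = 4 →
      ((k == PySem.Str.slice code none (some 4)) = true ↔ k.toList <+: code.toList) := by
    intro k hk
    have h : ((4 : Nat) : Int) = (4 : Int) := by norm_num
    rw [← h]; exact pvKeyIff code k hk
  have h2 : ∀ k : String, k.toList.length = 2 →
      ((k == PySem.Str.slice code none (some 2)) = true ↔ k.toList <+: code.toList) := by
    intro k hk
    have h : ((2 : Nat) : Int) = (2 : Int) := by norm_num
    rw [← h]; exact pvKeyIff code k hk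
  by_cases hAC : "AC".toList <+: code.toList
  case pos =>
    have hRC : ¬ ("RC".toList <+: code.toList) := fun h => pvExcl (by decide) (by decide) h hAC
    have hAM : ¬ ("AM".toList <+: code.toList) := fun h => pvExcl (by decide) (by decide) h hAC
    have hBE : ¬ ("BE".toList <+: code.toList) := fun h => pvExcl (by decide) (by decide) h hAC
    have hRR : ¬ ("RR".toList <+: code.toList) := fun h => pvExcl (by decide) (by decide) h hAC
    have hMM : ¬ ("MM".toList <+: code.toList) := fun h => pvExcl (by decide) (by decide) h hAC
    have hNARR : ¬ ("NARR".toList <+: code.toList) := fun h => pvExcl (by decide) (by decide) h hAC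
    have hAGNT : ¬ ("AGNT".toList <+: code.toList) := fun h => pvExcl (by decide) (by decide) h hAC
    have hCURR : ¬ ("CURR".toList <+: code.toList) := fun h => pvExcl (by decide) (by decide) h hAC
    simp_all [get_xpaths_alt, PySem.Dict.get?_mk_cons, e4, e2, enil, h4 "NARR" (by decide), h4 "AGNT" (by decide), h4 "CURR" (by decide), h2 "AC" (by decide), h2 "RC" (by decide), h2 "AM" (by decide), h2 "BE" (by decide), h2 "RR" (by decide), h2 "MM" (by decide)]
  case neg =>
  by_cases hRC : "RC".toList <+: code.toList
  case pos =>
    have hAM : ¬ ("AM".toList <+: code.toList) := fun h => pvExcl (by decide) (by decide) h hRC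
    have hBE : ¬ ("BE".toList <+: code.toList) := fun h => pvExcl (by decide) (by decide) h hRC
    have hRR : ¬ ("RR".toList <+: code.toList) := fun h => pvExcl (by decide) (by decide) h hRC
    have hMM : ¬ ("MM".toList <+: code.toList) := fun h => pvExcl (by decide) (by decide) h hRC
    have hNARR : ¬ ("NARR".toList <+: code.toList) := fun h => pvExcl (by decide) (by decide) h hRC
    have hAGNT : ¬ ("AGNT".toList <+: code.toList) := fun h => pvExcl (by decide) (by decide) h hRC
    have hCURR : ¬ ("CURR".toList <+: code.toList) := fun h => pvExcl (by decide) (by decide) h hRC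
    simp_all [get_xpaths_alt, PySem.Dict.get?_mk_cons, e4, e2, enil, h4 "NARR" (by decide), h4 "AGNT" (by decide), h4 "CURR" (by decide), h2 "AC" (by decide), h2 "RC" (by decide), h2 "AM" (by decide), h2 "BE" (by decide), h2 "RR" (by decide), h2 "MM" (by decide)]
  case neg =>
  by_cases hAM : "AM".toList <+: code.toList
  case pos =>
    have hBE : ¬ ("BE".toList <+: code.toList) := fun h => pvExcl (by decide) (by decide) h hAM
    have hRR : ¬ ("RR".toList <+: code.toList) := fun h => pvExcl (by decide) (by decide) h hAM
    have hMM : ¬ ("MM".toList <+: code.toList) := fun h => pvExcl (by decide) (by decide) h hAM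
    have hNARR : ¬ ("NARR".toList <+: code.toList) := fun h => pvExcl (by decide) (by decide) h hAM
    have hAGNT : ¬ ("AGNT".toList <+: code.toList) := fun h => pvExcl (by decide) (by decide) h hAM
    have hCURR : ¬ ("CURR".toList <+: code.toList) := fun h => pvExcl (by decide) (by decide) h hAM
    simp_all [get_xpaths_alt, PySem.Dict.get?_mk_cons, e4, e2, enil, h4 "NARR" (by decide), h4 "AGNT" (by decide), h4 "CURR" (by decide), h2 "AC" (by decide), h2 "RC" (by decide), h2 "AM" (by decide), h2 "BE" (by decide), h2 "RR" (by decide), h2 "MM" (by decide)]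
  case neg =>
  by_cases hBE : "BE".toList <+: code.toList
  case pos =>
    have hRR : ¬ ("RR".toList <+: code.toList) := fun h => pvExcl (by decide) (by decide) h hBE
    have hMM : ¬ ("MM".toList <+: code.toList) := fun h => pvExcl (by decide) (by decide) h hBE
    have hNARR : ¬ ("NARR".toList <+: code.toList) := fun h => pvExcl (by decide) (by decide) h hBE
    have hAGNT : ¬ ("AGNT".toList <+: code.toList) := fun h => pvExcl (by decide) (by decide) h hBE
    have hCURR : ¬ ("CURR".toList <+: code.toList) := fun h => pvExcl (by decide) (by decide) h hBE
    simp_all [get_xpaths_alt, PySem.Dict.get?_mk_cons, e4, e2, enil, h4 "NARR" (by decide), h4 "AGNT" (by decide), h4 "CURR" (by decide), h2 "AC" (by decide), h2 "RC" (by decide), h2 "AM" (by decide), h2 "BE" (by decide), h2 "RR" (by decide), h2 "MM" (by decide)]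
  case neg =>
  by_cases hRR : "RR".toList <+: code.toList
  case pos =>
    have hMM : ¬ ("MM".toList <+: code.toList) := fun h => pvExcl (by decide) (by decide) h hRR
    have hNARR : ¬ ("NARR".toList <+: code.toList) := fun h => pvExcl (by decide) (by decide) h hRR
    have hAGNT : ¬ ("AGNT".toList <+: code.toList) := fun h => pvExcl (by decide) (by decide) h hRR
    have hCURR : ¬ ("CURR".toList <+: code.toList) := fun h => pvExcl (by decide) (by decide) h hRR
    simp_all [get_xpaths_alt, PySem.Dict.get?_mk_cons, e4, e2, enil, h4 "NARR" (by decide), h4 "AGNT" (by decide), h4 "CURR" (by decide), h2 "AC" (by decide), h2 "RC" (by decide), h2 "AM" (by decide), h2 "BE" (by decide), h2 "RR" (by decide), h2 "MM" (by decide)]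
  case neg =>
  by_cases hMM : "MM".toList <+: code.toList
  case pos =>
    have hNARR : ¬ ("NARR".toList <+: code.toList) := fun h => pvExcl (by decide) (by decide) h hMM
    have hAGNT : ¬ ("AGNT".toList <+: code.toList) := fun h => pvExcl (by decide) (by decide) h hMM
    have hCURR : ¬ ("CURR".toList <+: code.toList) := fun h => pvExcl (by decide) (by decide) h hMM
    simp_all [get_xpaths_alt, PySem.Dict.get?_mk_cons, e4, e2, enil, h4 "NARR" (by decide), h4 "AGNT" (by decide), h4 "CURR" (by decide), h2 "AC" (by decide), h2 "RC" (by decide), h2 "AM" (by decide), h2 "BE" (by decide), h2 "RR" (by decide), h2 "MM" (by decide)]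
  case neg =>
  by_cases hNARR : "NARR".toList <+: code.toList
  case pos =>
    have hAGNT : ¬ ("AGNT".toList <+: code.toList) := fun h => pvExcl (by decide) (by decide) h hNARR
    have hCURR : ¬ ("CURR".toList <+: code.toList) := fun h => pvExcl (by decide) (by decide) h hNARR
    simp_all [get_xpaths_alt, PySem.Dict.get?_mk_cons, e4, e2, enil, h4 "NARR" (by decide), h4 "AGNT" (by decide), h4 "CURR" (by decide), h2 "AC" (by decide), h2 "RC" (by decide), h2 "AM" (by decide), h2 "BE" (by decide), h2 "RR" (by decide), h2 "MM" (by decide)]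
  case neg =>
  by_cases hAGNT : "AGNT".toList <+: code.toList
  case pos =>
    have hCURR : ¬ ("CURR".toList <+: code.toList) := fun h => pvExcl (by decide) (by decide) h hAGNT
    simp_all [get_xpaths_alt, PySem.Dict.get?_mk_cons, e4, e2, enil, h4 "NARR" (by decide), h4 "AGNT" (by decide), h4 "CURR" (by decide), h2 "AC" (by decide), h2 "RC" (by decide), h2 "AM" (by decide), h2 "BE" (by decide), h2 "RR" (by decide), h2 "MM" (by decide)]
  case neg =>
  by_cases hCURR : "CURR".toList <+: code.toList
  case pos =>
    simp_all [get_xpaths_alt, PySem.Dict.get?_mk_cons, e4, e2, enil, h4 "NARR" (by decide), h4 "AGNT" (by decide), h4 "CURR" (by decide), h2 "AC" (by decide), h2 "RC" (by decide), h2 "AM" (by decide), h2 "BE" (by decide), h2 "RR" (by decide), h2 "MM" (by decide)]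
  case neg =>
  simp_all [get_xpaths_alt, PySem.Dict.get?_mk_cons, e4, e2, enil, h4 "NARR" (by decide), h4 "AGNT" (by decide), h4 "CURR" (by decide), h2 "AC" (by decide), h2 "RC" (by decide), h2 "AM" (by decide), h2 "BE" (by decide), h2 "RR" (by decide), h2 "MM" (by decide)]
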